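-- pv_equiv track=rewrite | github.com/kafyja/data-inspector | superfluous-spaces/superfluousspaces.py | contains_multi_space
-- ===== SOURCE A (Python) =====
-- def contains_multi_space(variant: str):
--     at_space = False
--     for c in variant:
--         if not c.isalnum():
--             if at_space:
--                 return True
--             else:
--                 at_space = True
--         else:
--             at_space = False
--     return False
-- ===== SOURCE B (Python) =====
-- def contains_multi_space(variant: str):
--     return any(not a.isalnum() and not b.isalnum()
--                for a, b in zip(variant, variant[1:]))
-- ===== Notes on version B (the rewrite author's own statement) =====
-- stated objective: simpler
-- what changed: Replaces the stateful at_space flag scan with a stateless sliding-window test over adjacent character pairs via any(...) over zip(variant, variant[1:]).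
import Mathlib
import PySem

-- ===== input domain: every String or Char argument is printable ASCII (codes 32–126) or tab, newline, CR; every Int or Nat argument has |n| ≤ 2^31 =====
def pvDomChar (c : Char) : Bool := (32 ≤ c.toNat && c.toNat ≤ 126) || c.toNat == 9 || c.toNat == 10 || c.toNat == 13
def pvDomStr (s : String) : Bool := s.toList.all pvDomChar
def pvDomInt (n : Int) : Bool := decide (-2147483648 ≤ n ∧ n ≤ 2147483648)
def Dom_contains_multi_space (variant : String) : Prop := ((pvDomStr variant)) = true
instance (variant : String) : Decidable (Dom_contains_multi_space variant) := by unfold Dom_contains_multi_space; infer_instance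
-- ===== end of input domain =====

-- B replaces A's stateful at_space flag scan with a stateless test over adjacent character pairs.

-- ===== PORT A =====
-- the for-loop with the at_space flag and the early 'return True'
def cmsLoopA : List Char → Bool → Bool
  | [], _ => false
  | c :: cs, at_space =>
    if !PySem.Chars.isalnum c then
      if at_space then true else cmsLoopA cs true
    else
      cmsLoopA cs false

def contains_multi_space (variant : String) : Bool :=
  cmsLoopA variant.toList false

-- ===== PORT B =====
-- any(not a.isalnum() and not b.isalnum() for a, b in zip(variant, variant[1:]))
def cmsPairsB : List Char → Bool
  | a :: b :: rest =>
    (!PySem.Chars.isalnum a && !PySem.Chars.isalnum b) || cmsPairsB (b :: rest)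
  | _ => false

def contains_multi_space_alt (variant : String) : Bool :=
  cmsPairsB variant.toList

-- ===== PRECONDITION & SPEC =====
def Spec_contains_multi_space (variant : String) (out : Bool) : Prop := out = contains_multi_space_alt variant
instance (variant : String) (out : Bool) : Decidable (Spec_contains_multi_space variant out) := by unfold Spec_contains_multi_space; infer_instance

-- ===== CLAIM (what is proved, stated in full; the proofs are below) =====
def Claim_equal_contains_multi_space : Prop := ∀ (variant : String), Dom_contains_multi_space variant → Spec_contains_multi_space variant (contains_multi_space variant)

-- ===== LEMMAS AND PROOFS =====

-- loop invariant: with the flag down the scan computes the pairwise test; with the flag up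
-- it additionally fires on a non-alphanumeric head.
theorem cmsLoopA_eq (cs : List Char) :
    cmsLoopA cs false = cmsPairsB cs ∧
    cmsLoopA cs true =
      ((cs.head?.elim false fun c => !PySem.Chars.isalnum c) || cmsLoopA cs false) := by
  induction cs with
  | nil => simp [cmsLoopA, cmsPairsB]
  | cons c cs ih =>
    obtain ⟨ih₁, ih₂⟩ := ih
    constructor
    · cases cs with
      | nil => by_cases h : PySem.Chars.isalnum c <;> simp [cmsLoopA, cmsPairsB, h]
      | cons b rest =>
        have ih₁' : (if !PySem.Chars.isalnum b then cmsLoopA rest true else cmsLoopA rest false)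
            = cmsPairsB (b :: rest) := ih₁
        by_cases h : PySem.Chars.isalnum c <;>
          by_cases hb : PySem.Chars.isalnum b <;>
          simp [cmsLoopA, cmsPairsB, h, hb] <;>
          simpa [hb] using ih₁'
    · by_cases h : PySem.Chars.isalnum c <;> simp [cmsLoopA, h]

-- ===== VERDICT (by name: the statement is the Claim_ definition above) =====
theorem contains_multi_space_spec : Claim_equal_contains_multi_space := by
  intro variant _
  unfold Spec_contains_multi_space contains_multi_space contains_multi_space_alt
  exact (cmsLoopA_eq variant.toList).1
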